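-- pv_equiv track=rewrite | github.com/ilialecha/Programming_2 | Tests/4-12-22.py | largest_gc_neutral_of
-- ===== SOURCE A (Python) =====
-- def R_is_gc_neutral( DNA_Seq, low, high):
--     if low == high: return 0
--     return 1 + R_is_gc_neutral( DNA_Seq, low + 1, high ) if DNA_Seq[ low ] == 'G' or DNA_Seq[ low ] == 'C' else 0 + R_is_gc_neutral( DNA_Seq, low + 1, high )
--
-- def gc_neutral_base_case( DNA_Seq, size ):
--     if size % 2 == 0: return 2 * R_is_gc_neutral( DNA_Seq, 0, size) == size
--     return False
--
-- def largest_gc_neutral_of( DNA_Seq ):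
--     n = len ( DNA_Seq )
--     largest = 0
--     for i in range( n - 1 ):
--         for j in range( i , n ):
--             # If finding LAST largest occurrence, check if j - i + 1 >= largest
--             if gc_neutral_base_case( DNA_Seq[ i : j+1], j - i + 1 ) and  j - i + 1 > largest:
--                 largest = j - i + 1
--     return largest
-- ===== SOURCE B (Python) =====
-- def largest_gc_neutral_of(DNA_Seq):
--     first = {0: 0}          # first position at which each prefix balance occurs
--     bal = 0
--     best = 0
--     pos = 0
--     for c in DNA_Seq:
--         pos += 1
--         bal += 1 if (c == 'G' or c == 'C') else -1
--         if bal in first: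
--             d = pos - first[bal]
--             if d > best:
--                 best = d
--         else:
--             first[bal] = pos
--     return best
-- ===== Notes on version B (the rewrite author's own statement) =====
-- stated objective: faster
-- what changed: Replaced the triple-nested scan (recursive GC-count per substring) by a single pass keeping a running GC-balance and a hashmap of each balance value's first position; the longest balanced substring is the largest gap between equal balances.
import Mathlib
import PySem

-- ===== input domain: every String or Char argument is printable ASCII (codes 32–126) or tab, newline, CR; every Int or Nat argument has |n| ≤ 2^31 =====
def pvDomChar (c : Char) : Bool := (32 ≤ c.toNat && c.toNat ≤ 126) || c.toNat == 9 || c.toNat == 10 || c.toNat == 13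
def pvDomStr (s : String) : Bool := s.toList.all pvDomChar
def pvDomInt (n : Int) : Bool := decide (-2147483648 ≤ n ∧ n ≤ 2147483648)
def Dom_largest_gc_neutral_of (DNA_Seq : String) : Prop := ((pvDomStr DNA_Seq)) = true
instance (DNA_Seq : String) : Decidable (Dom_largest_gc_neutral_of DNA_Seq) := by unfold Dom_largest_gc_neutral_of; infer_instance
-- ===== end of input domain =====

-- B replaces A's triple-nested scan (recursive GC-count per substring) by one pass with a
-- running GC balance and a first-occurrence hashmap of balance values (objective: faster).

-- ===== PORT A =====

-- the 'else 0' branch (low > high) is a totality guard only; A calls R_is_gc_neutral with 0 ≤ low ≤ high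
def R_is_gc_neutral (DNA_Seq : String) (low high : Int) : Int :=
  if _h : low = high then 0
  else if _h2 : low < high then
    (if PySem.Str.pyGet? DNA_Seq low = some 'G' ∨ PySem.Str.pyGet? DNA_Seq low = some 'C' then 1 else 0)
      + R_is_gc_neutral DNA_Seq (low + 1) high
  else 0
termination_by (high - low).toNat
decreasing_by omega

def gc_neutral_base_case (DNA_Seq : String) (size : Int) : Bool :=
  if PySem.Int.mod size 2 = 0 then decide (2 * R_is_gc_neutral DNA_Seq 0 size = size)
  else false

def largest_gc_neutral_of (DNA_Seq : String) : Int :=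
  let n : Int := PySem.Str.len DNA_Seq
  (PySem.List.pyRange 0 (n - 1) 1).foldl (fun largest i =>
    (PySem.List.pyRange i n 1).foldl (fun largest j =>
      if gc_neutral_base_case (PySem.Str.slice DNA_Seq (some i) (some (j + 1))) (j - i + 1)
           ∧ j - i + 1 > largest
      then j - i + 1 else largest) largest) 0

-- ===== PORT B =====

-- state: (first-occurrence dict, balance, best, position)
def pvBStep (st : PySem.Dict Int Int × Int × Int × Int) (c : Char) :
    PySem.Dict Int Int × Int × Int × Int :=
  let pos := st.2.2.2 + 1
  let bal := st.2.1 + (if c = 'G' ∨ c = 'C' then 1 else -1)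
  if st.1.contains bal then
    -- Python 'first[bal]' : key is present, so getD with any default is exact
    let d := pos - st.1.getD bal 0
    (st.1, bal, (if d > st.2.2.1 then d else st.2.2.1), pos)
  else
    (st.1.insert bal pos, bal, st.2.2.1, pos)

def largest_gc_neutral_of_alt (DNA_Seq : String) : Int :=
  (DNA_Seq.toList.foldl pvBStep ((PySem.Dict.empty).insert 0 0, 0, 0, 0)).2.2.1

-- ===== PRECONDITION & SPEC =====
def Spec_largest_gc_neutral_of (DNA_Seq : String) (out : Int) : Prop := out = largest_gc_neutral_of_alt DNA_Seq
instance (DNA_Seq : String) (out : Int) : Decidable (Spec_largest_gc_neutral_of DNA_Seq out) := by unfold Spec_largest_gc_neutral_of; infer_instance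

-- ===== CLAIM (what is proved, stated in full; the proofs are below) =====
def Claim_equal_largest_gc_neutral_of : Prop := ∀ (DNA_Seq : String), Dom_largest_gc_neutral_of DNA_Seq → Spec_largest_gc_neutral_of DNA_Seq (largest_gc_neutral_of DNA_Seq)


-- ===== LEMMAS AND PROOFS =====

-- balance of one base: +1 for G/C, -1 otherwise
def pvBal (c : Char) : Int := if c = 'G' ∨ c = 'C' then 1 else -1

-- prefix balance of the first k characters
def pvPre (l : List Char) (k : Nat) : Int := ((l.take k).map pvBal).sum

-- all candidate values (j - i) for pairs i < j ≤ m with equal prefix balance (0 for unequal pairs)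
def pvCands (l : List Char) (m : Nat) : List Int :=
  (List.range (m + 1)).flatMap (fun j =>
    (List.range j).map (fun i => if pvPre l i = pvPre l j then ((j : Int) - (i : Int)) else 0))

def pvM (l : List Char) (m : Nat) : Int := (pvCands l m).foldl max 0

-- first index k ≤ m with prefix balance v
def pvFirst (l : List Char) (m : Nat) (v : Int) : Option Nat :=
  (List.range (m + 1)).find? (fun k => pvPre l k == v)

-- ---- generic fold/max lemmas ----

theorem pvFoldlMax_le (xs : List Int) (a c : Int) (h0 : a ≤ c) (h : ∀ x ∈ xs, x ≤ c) :
    xs.foldl max a ≤ c := by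
  rcases PySem.List.foldl_max_mem xs a with he | he
  · omega
  · exact h _ he

theorem pvFoldlMax_const (xs : List Int) (a : Int) (h : ∀ x ∈ xs, x ≤ a) :
    xs.foldl max a = a :=
  le_antisymm (pvFoldlMax_le xs a a le_rfl h) (PySem.List.le_foldl_max xs a).1

theorem pvFoldlMax_eq_max (xs : List Int) (a b : Int) (h1 : b ∈ xs) (h2 : ∀ x ∈ xs, x ≤ b) :
    xs.foldl max a = max a b := by
  refine le_antisymm (pvFoldlMax_le xs a (max a b) (le_max_left _ _)
    (fun x hx => le_trans (h2 x hx) (le_max_right _ _))) ?_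
  have := (PySem.List.le_foldl_max xs a).1
  have := (PySem.List.le_foldl_max xs a).2 b h1
  omega

theorem pvMx_le_mx (xs ys : List Int) (h : ∀ x ∈ xs, x ≤ 0 ∨ x ∈ ys) :
    xs.foldl max 0 ≤ ys.foldl max 0 := by
  have h0 : (0:Int) ≤ ys.foldl max 0 := (PySem.List.le_foldl_max ys 0).1
  refine pvFoldlMax_le xs 0 _ h0 (fun x hx => ?_)
  rcases h x hx with hle | hmem
  · omega
  · exact (PySem.List.le_foldl_max ys 0).2 x hmem

theorem pvMx_eq_mx (xs ys : List Int) (h1 : ∀ x ∈ xs, x ≤ 0 ∨ x ∈ ys)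
    (h2 : ∀ y ∈ ys, y ≤ 0 ∨ y ∈ xs) : xs.foldl max 0 = ys.foldl max 0 :=
  le_antisymm (pvMx_le_mx xs ys h1) (pvMx_le_mx ys xs h2)

theorem pvGuard_fold {α : Type} (xs : List α) (c : α → Prop) [DecidablePred c]
    (f : α → Int) (a : Int) (h : 0 ≤ a) :
    xs.foldl (fun acc x => if c x ∧ f x > acc then f x else acc) a
      = xs.foldl (fun acc x => max acc (if c x then f x else 0)) a := by
  induction xs generalizing a with
  | nil => rfl
  | cons x xs ih =>
    simp only [List.foldl_cons]
    have hstep : (if c x ∧ f x > a then f x else a) = max a (if c x then f x else 0) := by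
      by_cases hc : c x <;> simp [hc] <;> omega
    rw [hstep]
    exact ih _ (le_trans h (le_max_left _ _))



-- ---- A-side: characterising A as the max of pair candidates ----

theorem pvR_count (s : String) : ∀ (d a : Nat), s.toList.length = a + d →
    R_is_gc_neutral s (a : Int) (s.toList.length : Int)
      = ((s.toList.drop a).map (fun c => if c = 'G' ∨ c = 'C' then (1:Int) else 0)).sum := by
  intro d
  induction d with
  | zero =>
    intro a ha
    rw [R_is_gc_neutral]
    have hd : s.toList.drop a = [] := List.drop_eq_nil_of_le (by omega)
    simp [ha, hd]
  | succ d ih =>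
    intro a ha
    have hlt : a < s.toList.length := by omega
    rw [R_is_gc_neutral]
    rw [dif_neg (by exact_mod_cast Nat.ne_of_lt hlt), dif_pos (by exact_mod_cast hlt)]
    have hget : PySem.Str.pyGet? s (a : Int) = some (s.toList[a]'hlt) := by
      rw [PySem.Str.pyGet?_natCast, List.getElem?_eq_getElem hlt]
    have hcast : (a : Int) + 1 = ((a + 1 : Nat) : Int) := by omega
    rw [hget, hcast, ih (a+1) (by omega)]
    rw [List.drop_eq_getElem_cons hlt]
    simp only [List.map_cons, List.sum_cons, Option.some.injEq]

theorem pvBalSum (cs : List Char) :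
    (cs.map pvBal).sum
      = 2 * (cs.map (fun c => if c = 'G' ∨ c = 'C' then (1:Int) else 0)).sum - cs.length := by
  induction cs with
  | nil => simp
  | cons c cs ih =>
    simp only [List.map_cons, List.sum_cons, List.length_cons, ih, pvBal]
    by_cases hc : c = 'G' ∨ c = 'C' <;> simp [hc] <;> omega

theorem pvGcb (t : String) (size : Int) (hs : size = (t.toList.length : Int)) :
    (gc_neutral_base_case t size = true) ↔ (t.toList.map pvBal).sum = 0 := by
  have hR : R_is_gc_neutral t 0 size
      = (t.toList.map (fun c => if c = 'G' ∨ c = 'C' then (1:Int) else 0)).sum := by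
    have h0 := pvR_count t t.toList.length 0 (by omega)
    rw [hs]
    simpa using h0
  have hbal := pvBalSum t.toList
  unfold gc_neutral_base_case
  rw [hR]
  split_ifs with hm
  · simp only [decide_eq_true_eq]
    omega
  · simp only [false_iff]
    intro hb
    apply hm
    rw [PySem.Int.mod_eq_zero_iff_dvd]
    exact ⟨(t.toList.map (fun c => if c = 'G' ∨ c = 'C' then (1:Int) else 0)).sum, by omega⟩

theorem pvSeg (l : List Char) (i k : Nat) :
    (((l.drop i).take k).map pvBal).sum = pvPre l (i + k) - pvPre l i := by
  simp only [pvPre, List.take_add, List.map_append, List.sum_append]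
  ring

theorem pvCondA (s : String) (i j : Nat) (hij : i ≤ j) (hj : j < s.toList.length) :
    (gc_neutral_base_case (PySem.Str.slice s (some (i : Int)) (some ((j : Int) + 1)))
        ((j : Int) - (i : Int) + 1) = true)
      ↔ pvPre s.toList (j + 1) = pvPre s.toList i := by
  have hcast : ((j : Int) + 1) = ((j + 1 : Nat) : Int) := by omega
  have hslice : (PySem.Str.slice s (some (i : Int)) (some ((j : Int) + 1))).toList
      = (s.toList.drop i).take (j + 1 - i) := by
    rw [hcast]
    simp only [PySem.Str.slice, String.toList_ofList]
    exact PySem.List.slice_natCast s.toList i (j + 1)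
  have hlen : ((s.toList.drop i).take (j + 1 - i)).length = j + 1 - i := by
    simp only [List.length_take, List.length_drop]
    omega
  rw [pvGcb _ _ (by rw [hslice, hlen]; omega)]
  rw [hslice, pvSeg]
  have : i + (j + 1 - i) = j + 1 := by omega
  rw [this]
  omega

theorem pvPre_succ (l : List Char) (k : Nat) (h : k < l.length) :
    pvPre l (k + 1) = pvPre l k + pvBal (l[k]'h) := by
  simp only [pvPre, List.map_take]
  rw [List.take_add_one]
  simp [h]

theorem pvBal_pm (c : Char) : pvBal c = 1 ∨ pvBal c = -1 := by
  unfold pvBal; split <;> simp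

theorem pvPre_succ_ne (l : List Char) (k : Nat) (h : k < l.length) :
    pvPre l (k + 1) ≠ pvPre l k := by
  rw [pvPre_succ l k h]
  rcases pvBal_pm (l[k]'h) with h1 | h1 <;> omega

theorem pvNested (ys : List Int) (g : Int → List Int) (c : Int → Int → Prop)
    [inst : ∀ i j, Decidable (c i j)] (f : Int → Int → Int) (a : Int) (h : 0 ≤ a) :
    ys.foldl (fun L i => (g i).foldl (fun L j => if c i j ∧ f i j > L then f i j else L) L) a
      = (ys.flatMap (fun i => (g i).map (fun j => if c i j then f i j else 0))).foldl max a := by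
  induction ys generalizing a with
  | nil => rfl
  | cons y ys ih =>
    simp only [List.foldl_cons, List.flatMap_cons, List.foldl_append]
    rw [pvGuard_fold (g y) (c y) (f y) a h, ← List.foldl_map]
    exact ih _ (le_trans h (PySem.List.le_foldl_max _ _).1)

theorem pvA_eq_M (s : String) :
    largest_gc_neutral_of s = pvM s.toList s.toList.length := by
  unfold largest_gc_neutral_of
  rw [PySem.Str.len_eq]
  rw [pvNested (PySem.List.pyRange 0 ((s.toList.length : Int) - 1) 1)
      (fun i => PySem.List.pyRange i (s.toList.length : Int) 1)
      (fun i j => gc_neutral_base_case (PySem.Str.slice s (some i) (some (j + 1))) (j - i + 1) = true)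
      (fun i j => j - i + 1) 0 le_rfl]
  unfold pvM
  apply pvMx_eq_mx
  · intro x hx
    rw [List.mem_flatMap] at hx
    obtain ⟨i, hi, hx⟩ := hx
    rw [List.mem_map] at hx
    obtain ⟨j, hj, hx⟩ := hx
    rw [PySem.List.mem_pyRange_one] at hi hj
    by_cases hc : gc_neutral_base_case (PySem.Str.slice s (some i) (some (j + 1))) (j - i + 1) = true
    · right
      set iN := i.toNat with hiN
      set jN := j.toNat with hjN
      have hii : (iN : Int) = i := Int.toNat_of_nonneg (by omega)
      have hjj : (jN : Int) = j := Int.toNat_of_nonneg (by omega)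
      have hijN : iN ≤ jN := by omega
      have hjlt : jN < s.toList.length := by omega
      have hcond : pvPre s.toList (jN + 1) = pvPre s.toList iN := by
        rw [← pvCondA s iN jN hijN hjlt]
        rw [hii, hjj]
        exact hc
      unfold pvCands
      rw [List.mem_flatMap]
      refine ⟨jN + 1, by rw [List.mem_range]; omega, ?_⟩
      rw [List.mem_map]
      refine ⟨iN, by rw [List.mem_range]; omega, ?_⟩
      rw [if_pos hcond.symm, ← hx, if_pos hc]
      push_cast
      omega
    · left
      rw [← hx, if_neg hc]
  · intro x hx
    unfold pvCands at hx
    rw [List.mem_flatMap] at hx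
    obtain ⟨j', hj', hx⟩ := hx
    rw [List.mem_map] at hx
    obtain ⟨i', hi', hx⟩ := hx
    rw [List.mem_range] at hj' hi'
    by_cases hc : pvPre s.toList i' = pvPre s.toList j'
    · right
      have hne : i' + 1 ≠ j' := by
        intro hEq
        have hlt : i' < s.toList.length := by omega
        exact pvPre_succ_ne s.toList i' hlt (by rw [hEq]; exact hc.symm)
      have h2 : i' + 2 ≤ j' := by omega
      rw [List.mem_flatMap]
      refine ⟨(i' : Int), ?_, ?_⟩
      · rw [PySem.List.mem_pyRange_one]
        constructor
        · omega
        · have : i' + 2 ≤ s.toList.length := by omega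
          omega
      rw [List.mem_map]
      refine ⟨((j' - 1 : Nat) : Int), ?_, ?_⟩
      · rw [PySem.List.mem_pyRange_one]
        constructor
        · exact_mod_cast by omega
        · exact_mod_cast by omega
      have hcnd : gc_neutral_base_case
          (PySem.Str.slice s (some ((i' : Nat) : Int)) (some (((j' - 1 : Nat) : Int) + 1)))
          (((j' - 1 : Nat) : Int) - ((i' : Nat) : Int) + 1) = true := by
        rw [pvCondA s i' (j' - 1) (by omega) (by omega)]
        have : j' - 1 + 1 = j' := by omega
        rw [this]
        exact hc.symm
      rw [if_pos hcnd, ← hx, if_pos hc]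
      omega
    · left
      rw [← hx, if_neg hc]


-- ---- B-side: loop invariant for the one-pass fold ----

theorem pvFind?_range_min (p : Nat → Bool) (n i : Nat)
    (h : (List.range n).find? p = some i) :
    i < n ∧ p i = true ∧ ∀ k < i, p k = false := by
  induction n with
  | zero => simp at h
  | succ n ih =>
    rw [List.range_succ, List.find?_append] at h
    cases hf : (List.range n).find? p with
    | some j =>
      rw [hf, Option.some_or] at h
      injection h with h
      subst h
      obtain ⟨hj1, hj2, hj3⟩ := ih hf
      exact ⟨by omega, hj2, hj3⟩
    | none =>
      rw [hf] at h
      have hnone := List.find?_eq_none.mp hf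
      simp only [Option.none_or] at h
      cases hp : p n with
      | false => rw [List.find?_cons_of_neg (by simp [hp])] at h; simp at h
      | true =>
        rw [List.find?_cons_of_pos (by simp [hp])] at h
        cases h
        refine ⟨by omega, hp, fun k hk => ?_⟩
        have := hnone k (by rw [List.mem_range]; omega)
        simpa using this

theorem pvFirst_succ (l : List Char) (m : Nat) (v : Int) :
    pvFirst l (m + 1) v
      = (pvFirst l m v).or (if pvPre l (m + 1) == v then some (m + 1) else none) := by
  unfold pvFirst
  rw [List.range_succ, List.find?_append]
  congr 1
  rw [List.find?_singleton]

theorem pvFind?_congr {α : Type} {p q : α → Bool} {l : List α}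
    (h : ∀ x ∈ l, p x = q x) : l.find? p = l.find? q := by
  induction l with
  | nil => rfl
  | cons a l ih =>
    cases hp : p a with
    | true =>
      rw [List.find?_cons_of_pos hp, List.find?_cons_of_pos (by rw [← h a (by simp), hp])]
    | false =>
      rw [List.find?_cons_of_neg (by simp [hp]),
        List.find?_cons_of_neg (by simp [← h a (List.mem_cons_self), hp])]
      exact ih (fun x hx => h x (List.mem_cons_of_mem a hx))

theorem pvPre_prefix (p q : List Char) (k : Nat) (h : k ≤ p.length) :
    pvPre (p ++ q) k = pvPre p k := by
  simp only [pvPre]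
  rw [List.take_append_of_le_length h]

theorem pvFirst_prefix (p q : List Char) (m : Nat) (h : m ≤ p.length) (v : Int) :
    pvFirst (p ++ q) m v = pvFirst p m v := by
  unfold pvFirst
  apply pvFind?_congr
  intro k hk
  rw [List.mem_range] at hk
  rw [pvPre_prefix p q k (by omega)]

theorem pvCands_prefix (p q : List Char) (m : Nat) (h : m ≤ p.length) :
    pvCands (p ++ q) m = pvCands p m := by
  unfold pvCands
  rw [List.flatMap_def, List.flatMap_def]
  refine congrArg List.flatten ?_
  apply List.map_congr_left
  intro j hj
  rw [List.mem_range] at hj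
  apply List.map_congr_left
  intro i hi
  rw [List.mem_range] at hi
  rw [pvPre_prefix p q i (by omega), pvPre_prefix p q j (by omega)]

theorem pvM_prefix (p q : List Char) (m : Nat) (h : m ≤ p.length) :
    pvM (p ++ q) m = pvM p m := by
  unfold pvM
  rw [pvCands_prefix p q m h]

theorem pvCands_succ (l : List Char) (m : Nat) :
    pvCands l (m + 1) = pvCands l m
      ++ (List.range (m + 1)).map
          (fun i => if pvPre l i = pvPre l (m + 1) then ((m + 1 : Nat) : Int) - (i : Int) else 0) := by
  unfold pvCands
  rw [show m + 1 + 1 = (m + 1) + 1 from rfl, List.range_succ, List.flatMap_append]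
  simp

theorem pvM_succ_none (l : List Char) (m : Nat)
    (h : ∀ k ≤ m, pvPre l k ≠ pvPre l (m + 1)) : pvM l (m + 1) = pvM l m := by
  unfold pvM
  rw [pvCands_succ, List.foldl_append]
  apply pvFoldlMax_const
  intro x hx
  rw [List.mem_map] at hx
  obtain ⟨k, hk, hx⟩ := hx
  rw [List.mem_range] at hk
  rw [if_neg (h k (by omega))] at hx
  have h0 : (0:Int) ≤ (pvCands l m).foldl max 0 := (PySem.List.le_foldl_max _ _).1
  omega

theorem pvM_succ_some (l : List Char) (m i : Nat) (hi : i ≤ m)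
    (hpre : pvPre l i = pvPre l (m + 1))
    (hmin : ∀ k < i, pvPre l k ≠ pvPre l (m + 1)) :
    pvM l (m + 1) = max (pvM l m) (((m + 1 : Nat) : Int) - (i : Int)) := by
  unfold pvM
  rw [pvCands_succ, List.foldl_append]
  apply pvFoldlMax_eq_max
  · rw [List.mem_map]
    exact ⟨i, by rw [List.mem_range]; omega, by rw [if_pos hpre]⟩
  · intro x hx
    rw [List.mem_map] at hx
    obtain ⟨k, hk, hx⟩ := hx
    rw [List.mem_range] at hk
    by_cases hc : pvPre l k = pvPre l (m + 1)
    · rw [if_pos hc] at hx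
      have : ¬ k < i := fun hlt => hmin k hlt hc
      have : i ≤ k := by omega
      push_cast at hx ⊢
      omega
    · rw [if_neg hc] at hx
      push_cast at hx ⊢
      omega

theorem pvPre_append_last (p : List Char) (c : Char) :
    pvPre (p ++ [c]) (p.length + 1) = pvPre p p.length + pvBal c := by
  rw [pvPre_succ (p ++ [c]) p.length (by simp)]
  rw [pvPre_prefix p [c] p.length le_rfl, List.getElem_concat_length rfl]

def pvInv (p : List Char) (st : PySem.Dict Int Int × Int × Int × Int) : Prop :=
  st.2.1 = pvPre p p.length ∧ st.2.2.2 = (p.length : Int) ∧ st.2.2.1 = pvM p p.length ∧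
  ∀ v : Int, st.1.get? v = Option.map (Nat.cast : Nat → Int) (pvFirst p p.length v)

theorem pvStep (p : List Char) (c : Char) (st : PySem.Dict Int Int × Int × Int × Int)
    (h : pvInv p st) : pvInv (p ++ [c]) (pvBStep st c) := by
  obtain ⟨hbal, hpos, hbest, hdict⟩ := h
  have hlen : (p ++ [c]).length = p.length + 1 := by simp
  have hb' : pvPre (p ++ [c]) (p.length + 1) = pvPre p p.length + pvBal c :=
    pvPre_append_last p c
  set b' : Int := pvPre p p.length + pvBal c with hb'def
  have hbalc : st.2.1 + (if c = 'G' ∨ c = 'C' then 1 else -1) = b' := by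
    rw [hbal]; rfl
  have hcont : st.1.contains b' = (pvFirst p p.length b').isSome := by
    rw [PySem.Dict.contains_eq_isSome_get?, hdict b', Option.isSome_map]
  unfold pvBStep
  simp only [hbalc, hpos, hbest]
  by_cases hsome : (pvFirst p p.length b').isSome
  · obtain ⟨i, hfirst⟩ := Option.isSome_iff_exists.mp hsome
    obtain ⟨hilt, hip, himin⟩ := pvFind?_range_min _ _ _ hfirst
    have hieq : pvPre p i = b' := by simpa using hip
    have himin' : ∀ k < i, pvPre p k ≠ b' := fun k hk => by
      have := himin k hk; simpa using this
    rw [if_pos (by rw [hcont]; exact hsome)]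
    have hgetD : st.1.getD b' 0 = (i : Int) := by
      rw [PySem.Dict.getD_eq_get?_getD, hdict b', hfirst]; rfl
    refine ⟨?_, ?_, ?_, ?_⟩
    · simp [hlen, hb', hb'def]
    · simp [hlen]
    · -- best component
      show (if (p.length : Int) + 1 - st.1.getD b' 0 > pvM p p.length
            then (p.length : Int) + 1 - st.1.getD b' 0 else pvM p p.length)
          = pvM (p ++ [c]) (p ++ [c]).length
      rw [hgetD, hlen]
      have hsome' : pvM (p ++ [c]) (p.length + 1)
          = max (pvM (p ++ [c]) p.length) (((p.length + 1 : Nat) : Int) - (i : Int)) := by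
        apply pvM_succ_some (p ++ [c]) p.length i (by omega)
        · rw [pvPre_prefix p [c] i (by omega), hb']; exact hieq
        · intro k hk
          rw [pvPre_prefix p [c] k (by omega), hb']
          exact himin' k hk
      rw [hsome', pvM_prefix p [c] p.length le_rfl]
      push_cast
      omega
    · intro v
      show st.1.get? v = _
      rw [hdict v, hlen, pvFirst_succ, pvFirst_prefix p [c] p.length le_rfl, hb']
      cases hv : pvFirst p p.length v with
      | some j => simp
      | none =>
        have hne : (b' == v) = false := by
          by_cases hbv : b' = v
          · rw [hbv] at hfirst; rw [hfirst] at hv; cases hv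
          · simp [hbv]
        simp [hne]
  · have hnone : pvFirst p p.length b' = none := Option.not_isSome_iff_eq_none.mp hsome
    have hall : ∀ k ≤ p.length, pvPre p k ≠ b' := by
      intro k hk
      have := List.find?_eq_none.mp hnone k (by rw [List.mem_range]; omega)
      simpa using this
    rw [if_neg (by rw [hcont]; exact hsome)]
    refine ⟨?_, ?_, ?_, ?_⟩
    · simp [hlen, hb', hb'def]
    · simp [hlen]
    · show pvM p p.length = pvM (p ++ [c]) (p ++ [c]).length
      rw [hlen]
      rw [pvM_succ_none (p ++ [c]) p.length (by
        intro k hk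
        rw [pvPre_prefix p [c] k (by omega), hb']
        exact hall k hk)]
      rw [pvM_prefix p [c] p.length le_rfl]
    · intro v
      show (st.1.insert b' ((p.length : Int) + 1)).get? v = _
      rw [PySem.Dict.get?_insert, hdict v, hlen, pvFirst_succ,
        pvFirst_prefix p [c] p.length le_rfl, hb']
      by_cases hbv : v = b'
      · rw [if_pos hbv, hbv, hnone]
        simp
      · rw [if_neg hbv]
        have hne : (b' == v) = false := by
          simp only [beq_eq_false_iff_ne, ne_eq]
          exact fun h => hbv h.symm
        simp [hne]

theorem pvFold (rest : List Char) : ∀ (p : List Char) (st : PySem.Dict Int Int × Int × Int × Int),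
    pvInv p st → pvInv (p ++ rest) (rest.foldl pvBStep st) := by
  induction rest with
  | nil => intro p st h; simpa using h
  | cons c rest ih =>
    intro p st h
    rw [List.foldl_cons]
    have := ih (p ++ [c]) (pvBStep st c) (pvStep p c st h)
    simpa using this

theorem pvInit : pvInv [] ((PySem.Dict.empty).insert 0 0, 0, 0, 0) := by
  refine ⟨by simp [pvPre], by simp, by rfl, ?_⟩
  intro v
  show ((PySem.Dict.empty (κ := Int) (ν := Int)).insert 0 0).get? v = _
  rw [PySem.Dict.get?_insert]
  by_cases hv : v = 0
  · subst hv
    simp [pvFirst, pvPre, List.range_succ]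
  · rw [if_neg hv]
    have : pvFirst [] 0 v = none := by
      simp [pvFirst, pvPre, List.range_succ]
      omega
    simp [this, PySem.Dict.get?_empty]

theorem pvB_eq_M (s : String) :
    largest_gc_neutral_of_alt s = pvM s.toList s.toList.length := by
  unfold largest_gc_neutral_of_alt
  have h := pvFold s.toList [] _ pvInit
  rw [List.nil_append] at h
  exact h.2.2.1

theorem largest_gc_neutral_of_agree (s : String) :
    largest_gc_neutral_of s = largest_gc_neutral_of_alt s := by
  rw [pvA_eq_M, pvB_eq_M]

-- ===== VERDICT (by name: the statement is the Claim_ definition above) =====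
theorem largest_gc_neutral_of_spec : Claim_equal_largest_gc_neutral_of := by
  intro s _
  unfold Spec_largest_gc_neutral_of
  exact largest_gc_neutral_of_agree s
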